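-- pv_equiv track=rewrite | github.com/Neclow/Alphafold3_tools | fasta2json.py | generate_ids
-- ===== SOURCE A (Python) =====
-- from itertools import product
-- from string import ascii_uppercase
--
-- def generate_ids(start_index, count):
--     sequence = []
--     length = 1
--     while len(sequence) < count:
--         for item in product(ascii_uppercase, repeat=length):
--             if len(sequence) == count:
--                 break
--             if start_index > 0:
--                 start_index -= 1
--                 continue
--             sequence.append("".join(item[::-1]))
--         length += 1
--     return sequence
-- ===== SOURCE B (Python) =====
-- def generate_ids(start_index, count):
--     result = []
--     base = max(start_index, 0)
--     for i in range(max(count, 0)):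
--         q = base + i
--         length = 1
--         block = 26
--         while q >= block:
--             q -= block
--             block *= 26
--             length += 1
--         chars = []
--         for _ in range(length):
--             chars.append(chr(65 + q % 26))
--             q //= 26
--         result.append(''.join(chars))
--     return result
-- ===== Notes on version B (the rewrite author's own statement) =====
-- stated objective: alternative
-- what changed: Instead of enumerating and discarding the first start_index products of A-Z tuples of growing length, B computes each ID directly from its global position by base-26 decomposition (subtract block sizes to find the length, then emit digits least-significant first).
import Mathlib
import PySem

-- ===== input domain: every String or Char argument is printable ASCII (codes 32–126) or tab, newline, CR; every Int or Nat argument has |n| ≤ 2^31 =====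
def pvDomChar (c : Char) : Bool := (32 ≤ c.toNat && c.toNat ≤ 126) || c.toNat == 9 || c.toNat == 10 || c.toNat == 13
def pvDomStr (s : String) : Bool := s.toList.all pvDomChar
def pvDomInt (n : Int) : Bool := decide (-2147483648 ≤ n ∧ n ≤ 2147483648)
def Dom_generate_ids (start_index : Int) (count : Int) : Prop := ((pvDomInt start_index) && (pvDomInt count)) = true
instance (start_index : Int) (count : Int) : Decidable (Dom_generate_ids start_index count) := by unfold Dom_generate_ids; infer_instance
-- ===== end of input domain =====

-- B replaces A's enumerate-and-skip over products of growing length by direct base-26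
-- decomposition of each ID's global position (objective: alternative algorithm, same result).

-- ===== PORT A =====
-- ascii_uppercase
def pvAZ : List Char := "ABCDEFGHIJKLMNOPQRSTUVWXYZ".toList

-- itertools.product(ascii_uppercase, repeat=n), each tuple as a List Char (first coordinate varies slowest)
def pvProd : Nat → List (List Char)
  | 0 => [[]]
  | n + 1 => pvAZ.flatMap (fun c => (pvProd n).map (fun t => c :: t))

-- the inner `for item in product(...)` loop with its break/continue, threading (start_index, sequence)
def pvInner (count : Int) : List (List Char) → Int → List String → Int × List String
  | [], si, seq => (si, seq)
  | item :: rest, si, seq =>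
    if (seq.length : Int) = count then (si, seq)
    else if si > 0 then pvInner count rest (si - 1) seq
    else pvInner count rest si (seq ++ [String.ofList item.reverse])

theorem pvInner_stop (count : Int) (items : List (List Char)) (si : Int) (seq : List String)
    (h : (seq.length : Int) = count) : pvInner count items si seq = (si, seq) := by
  cases items <;> simp [pvInner, h]

theorem pvInner_cons (count : Int) (item : List Char) (rest : List (List Char))
    (si : Int) (seq : List String) :
    pvInner count (item :: rest) si seq =
      if (seq.length : Int) = count then (si, seq)
      else if si > 0 then pvInner count rest (si - 1) seq
      else pvInner count rest si (seq ++ [String.ofList item.reverse]) := rfl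

theorem pvInner_measure (count : Int) : ∀ (items : List (List Char)) (si : Int) (seq : List String),
    items ≠ [] → (seq.length : Int) < count →
    (pvInner count items si seq).1.toNat + (count.toNat - (pvInner count items si seq).2.length)
      < si.toNat + (count.toNat - seq.length) := by
  intro items
  induction items with
  | nil => intro si seq h; exact absurd rfl h
  | cons item rest ih =>
    intro si seq _ hlt
    have hne : ¬ ((seq.length : Int) = count) := by omega
    by_cases hsi : si > 0
    · rw [pvInner_cons, if_neg hne, if_pos hsi]
      cases rest with
      | nil => simp [pvInner]; omega
      | cons b bs =>
        have := ih (si - 1) seq (by simp) hlt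
        omega
    · by_cases hfull : ((seq ++ [String.ofList item.reverse]).length : Int) = count
      · rw [pvInner_cons, if_neg hne, if_neg hsi,
          pvInner_stop count rest si _ hfull]
        simp at hfull ⊢
        omega
      · rw [pvInner_cons, if_neg hne, if_neg hsi]
        cases rest with
        | nil =>
          simp [pvInner]
          omega
        | cons b bs =>
          have hlt2 : (((seq ++ [String.ofList item.reverse]).length : Int)) < count := by
            simp at hfull ⊢; omega
          have := ih si (seq ++ [String.ofList item.reverse]) (by simp) hlt2
          simp at this ⊢
          omega

theorem pvProd_length : ∀ n, (pvProd n).length = 26 ^ n := by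
  intro n
  induction n with
  | zero => simp [pvProd]
  | succ n ih =>
    simp [pvProd, List.length_flatMap, ih, List.map_const']
    rw [show pvAZ.length = 26 from rfl, pow_succ]
    ring

theorem pvProd_ne_nil (n : Nat) : pvProd n ≠ [] := by
  have h := pvProd_length n
  intro hc
  rw [hc] at h
  simp at h
  exact absurd h.symm (by positivity)

-- the outer `while len(sequence) < count` loop
def pvOuter (count : Int) (si : Int) (seq : List String) (length : Nat) : List String :=
  if h : (seq.length : Int) < count then
    let p := pvInner count (pvProd length) si seq
    pvOuter count p.1 p.2 (length + 1)
  else seq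
termination_by si.toNat + (count.toNat - seq.length)
decreasing_by
  exact pvInner_measure count (pvProd length) si seq (pvProd_ne_nil length) h

def generate_ids (start_index : Int) (count : Int) : List String :=
  pvOuter count start_index [] 1

-- ===== PORT B =====
-- the `while q >= block` loop: strips whole blocks, returns (q, length).
-- (the `0 < block` conjunct only makes the recursion total; every call has block ≥ 26)
def pvStrip (q : Nat) (block : Nat) (len : Nat) : Nat × Nat :=
  if h : 0 < block ∧ block ≤ q then pvStrip (q - block) (block * 26) (len + 1)
  else (q, len)
termination_by q
decreasing_by omega

-- the `for _ in range(length)` digit loop, least-significant digit first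
def pvDigits : Nat → Nat → List Char
  | 0, _ => []
  | n + 1, q => Char.ofNat (65 + q % 26) :: pvDigits n (q / 26)

-- body of B's main loop for one global position
def pvIdAt (p : Nat) : String :=
  let rl := pvStrip p 26 1
  String.ofList (pvDigits rl.2 rl.1)

def generate_ids_alt (start_index : Int) (count : Int) : List String :=
  (List.range count.toNat).map (fun i => pvIdAt ((max start_index 0).toNat + i))

-- ===== PRECONDITION & SPEC =====
def Spec_generate_ids (start_index : Int) (count : Int) (out : List String) : Prop := out = generate_ids_alt start_index count
instance (start_index : Int) (count : Int) (out : List String) : Decidable (Spec_generate_ids start_index count out) := by unfold Spec_generate_ids; infer_instance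

-- ===== CLAIM (what is proved, stated in full; the proofs are below) =====
def Claim_equal_generate_ids : Prop := ∀ (start_index : Int) (count : Int), Dom_generate_ids start_index count → Spec_generate_ids start_index count (generate_ids start_index count)

-- ===== LEMMAS AND PROOFS =====

-- the IDs of length L, in A's enumeration order, as strings
def pvBlockStrs (L : Nat) : List String := (pvProd L).map (fun t => String.ofList t.reverse)

-- the ID at global position p, if enumeration starts at length L (block size 26^L)
def pvIdFrom (L : Nat) (p : Nat) : String :=
  let rl := pvStrip p (26 ^ L) L
  String.ofList (pvDigits rl.2 rl.1)

-- digits of q base 26, most significant first, padded/truncated to width L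
def pvMsb : Nat → Nat → List Char
  | 0, _ => []
  | L + 1, q => Char.ofNat (65 + q / 26 ^ L % 26) :: pvMsb L (q % 26 ^ L)

theorem pvDigits_snoc : ∀ (L q : Nat),
    pvDigits (L + 1) q = pvDigits L (q % 26 ^ L) ++ [Char.ofNat (65 + q / 26 ^ L % 26)] := by
  intro L
  induction L with
  | zero => intro q; simp [pvDigits]
  | succ L ih =>
    intro q
    have e1 : q % 26 ^ (L + 1) % 26 = q % 26 := Nat.mod_mod_of_dvd q ⟨26 ^ L, by ring⟩
    have e2 : q % 26 ^ (L + 1) / 26 = q / 26 % 26 ^ L := by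
      rw [show (26 : Nat) ^ (L + 1) = 26 * 26 ^ L from by ring]
      exact Nat.mod_mul_right_div_self q 26 (26 ^ L)
    have e3 : q / 26 / 26 ^ L = q / 26 ^ (L + 1) := by
      rw [Nat.div_div_eq_div_mul, show (26 : Nat) * 26 ^ L = 26 ^ (L + 1) from by ring]
    calc pvDigits (L + 2) q
        = Char.ofNat (65 + q % 26) :: pvDigits (L + 1) (q / 26) := rfl
      _ = Char.ofNat (65 + q % 26) ::
            (pvDigits L (q / 26 % 26 ^ L) ++ [Char.ofNat (65 + q / 26 / 26 ^ L % 26)]) := by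
            rw [ih]
      _ = pvDigits (L + 1) (q % 26 ^ (L + 1)) ++ [Char.ofNat (65 + q / 26 ^ (L + 1) % 26)] := by
            show _ = (Char.ofNat (65 + q % 26 ^ (L+1) % 26) :: pvDigits L (q % 26 ^ (L+1) / 26)) ++ _
            rw [e1, e2, e3]
            simp

theorem pvMsb_eq_reverse : ∀ (L q : Nat), pvMsb L q = (pvDigits L q).reverse := by
  intro L
  induction L with
  | zero => intro q; simp [pvMsb, pvDigits]
  | succ L ih =>
    intro q
    rw [pvDigits_snoc]
    simp [pvMsb, ih]

theorem pvFlatMap_congr {α β : Type} {l : List α} {f g : α → List β}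
    (h : ∀ a ∈ l, f a = g a) : l.flatMap f = l.flatMap g := by
  induction l with
  | nil => rfl
  | cons a l ih =>
    simp only [List.flatMap_cons]
    rw [h a (by simp), ih (fun x hx => h x (by simp [hx]))]

theorem pvFlatRange {α : Type} (f : Nat → α) : ∀ (k n : Nat),
    (List.range k).flatMap (fun a => (List.range n).map (fun r => f (a * n + r)))
      = (List.range (k * n)).map f := by
  intro k n
  induction k with
  | zero => simp
  | succ k ih =>
    rw [List.range_succ, List.flatMap_append, ih,
        show (k + 1) * n = k * n + n from by ring, List.range_add,
        List.map_append, List.map_map]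
    simp [Function.comp]

theorem pvAZ_eq : pvAZ = (List.range 26).map (fun a => Char.ofNat (65 + a)) := by decide

theorem pvProd_eq_range : ∀ L, pvProd L = (List.range (26 ^ L)).map (pvMsb L) := by
  intro L
  induction L with
  | zero => simp [pvProd, pvMsb]
  | succ L ih =>
    have key : ∀ a ∈ List.range 26,
        (List.range (26 ^ L)).map (fun r => pvMsb (L + 1) (a * 26 ^ L + r))
          = (List.range (26 ^ L)).map (fun r => Char.ofNat (65 + a) :: pvMsb L r) := by
      intro a ha
      apply List.map_congr_left
      intro r hr
      rw [List.mem_range] at ha hr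
      show Char.ofNat (65 + (a * 26 ^ L + r) / 26 ^ L % 26) ::
             pvMsb L ((a * 26 ^ L + r) % 26 ^ L) = _
      have hpos : 0 < 26 ^ L := pow_pos (by norm_num) L
      rw [Nat.mul_add_mod', Nat.mod_eq_of_lt hr, Nat.add_comm (a * 26 ^ L) r,
          Nat.add_mul_div_right r a hpos, Nat.div_eq_of_lt hr,
          Nat.mod_eq_of_lt (by omega)]
      simp
    calc pvProd (L + 1)
        = pvAZ.flatMap (fun c => (pvProd L).map (fun t => c :: t)) := rfl
      _ = ((List.range 26).map (fun a => Char.ofNat (65 + a))).flatMap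
            (fun c => ((List.range (26 ^ L)).map (pvMsb L)).map (fun t => c :: t)) := by
            rw [pvAZ_eq, ih]
      _ = (List.range 26).flatMap
            (fun a => (List.range (26 ^ L)).map (fun r => Char.ofNat (65 + a) :: pvMsb L r)) := by
            rw [List.flatMap_map]
            simp [Function.comp_def]
      _ = (List.range 26).flatMap
            (fun a => (List.range (26 ^ L)).map (fun r => pvMsb (L + 1) (a * 26 ^ L + r))) := by
            exact (pvFlatMap_congr key).symm
      _ = (List.range (26 * 26 ^ L)).map (pvMsb (L + 1)) := pvFlatRange (pvMsb (L + 1)) 26 (26 ^ L)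
      _ = (List.range (26 ^ (L + 1))).map (pvMsb (L + 1)) := by ring_nf

theorem pvIdFrom_step (L p : Nat) (h : 26 ^ L ≤ p) :
    pvIdFrom L p = pvIdFrom (L + 1) (p - 26 ^ L) := by
  unfold pvIdFrom
  rw [pvStrip, dif_pos ⟨pow_pos (by norm_num) L, h⟩,
      show (26 : Nat) ^ L * 26 = 26 ^ (L + 1) from by ring]

theorem pvIdFrom_base (L p : Nat) (h : p < 26 ^ L) :
    pvIdFrom L p = String.ofList (pvDigits L p) := by
  unfold pvIdFrom
  rw [pvStrip, dif_neg (by omega)]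

theorem pvBlockStrs_eq (L : Nat) :
    pvBlockStrs L = (List.range (26 ^ L)).map (fun q => String.ofList (pvDigits L q)) := by
  unfold pvBlockStrs
  rw [pvProd_eq_range, List.map_map]
  apply List.map_congr_left
  intro q _
  simp [pvMsb_eq_reverse]

theorem pvBlockStrs_length (L : Nat) : (pvBlockStrs L).length = 26 ^ L := by
  simp [pvBlockStrs, pvProd_length]

theorem pvBlock_slice (L s k : Nat) (h : s + k ≤ 26 ^ L) :
    ((pvBlockStrs L).drop s).take k = (List.range k).map (fun i => pvIdFrom L (s + i)) := by
  rw [pvBlockStrs_eq]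
  apply List.ext_getElem
  · simp
    omega
  · intro i h1 h2
    simp only [List.getElem_take, List.getElem_drop, List.getElem_map, List.getElem_range]
    have hi : i < k := by simp at h2; omega
    rw [pvIdFrom_base L (s + i) (by omega)]

theorem pvInner_char (count : Int) : ∀ (items : List (List Char)) (si : Int) (seq : List String),
    (seq.length : Int) < count →
    pvInner count items si seq =
      (si - (min si.toNat items.length : Nat),
       seq ++ ((items.map (fun t => String.ofList t.reverse)).drop si.toNat).take (count.toNat - seq.length)) := by
  intro items
  induction items with
  | nil => intro si seq hlt; simp [pvInner]
  | cons item rest ih =>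
    intro si seq hlt
    have hne : ¬ ((seq.length : Int) = count) := by omega
    rw [pvInner_cons, if_neg hne]
    by_cases hsi : si > 0
    · rw [if_pos hsi, ih (si - 1) seq hlt]
      have h1 : si.toNat = (si - 1).toNat + 1 := by omega
      refine Prod.ext ?_ ?_
      · show si - 1 - ((min (si - 1).toNat rest.length : Nat) : Int)
            = si - ((min si.toNat (item :: rest).length : Nat) : Int)
        simp only [List.length_cons]
        omega
      · show seq ++ _ = seq ++ _
        rw [h1]
        simp [List.drop_succ_cons]
    · rw [if_neg hsi]
      have hs0 : si.toNat = 0 := by omega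
      by_cases hfull : ((seq ++ [String.ofList item.reverse]).length : Int) = count
      · rw [pvInner_stop count rest si _ hfull]
        have hk : count.toNat - seq.length = 1 := by simp at hfull; omega
        refine Prod.ext ?_ ?_
        · show si = si - ((min si.toNat (item :: rest).length : Nat) : Int)
          simp [hs0]
        · show seq ++ [String.ofList item.reverse] = seq ++ _
          rw [hk, hs0]
          simp
      · have hlt2 : ((seq ++ [String.ofList item.reverse]).length : Int) < count := by
          simp at hfull ⊢; omega
        rw [ih si _ hlt2]
        refine Prod.ext ?_ ?_
        · show si - ((min si.toNat rest.length : Nat) : Int)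
              = si - ((min si.toNat (item :: rest).length : Nat) : Int)
          simp [hs0]
        · show (seq ++ [String.ofList item.reverse]) ++ _ = seq ++ _
          have hk : count.toNat - seq.length = (count.toNat - (seq ++ [String.ofList item.reverse]).length) + 1 := by
            simp at hlt2 ⊢; omega
          rw [hk, hs0]
          simp [List.take_succ_cons]

theorem pvOuter_char (count : Int) : ∀ (n : Nat) (si : Int) (seq : List String) (L : Nat),
    si.toNat + (count.toNat - seq.length) ≤ n →
    pvOuter count si seq L =
      seq ++ (List.range (count.toNat - seq.length)).map (fun i => pvIdFrom L (si.toNat + i)) := by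
  intro n
  induction n with
  | zero =>
    intro si seq L h
    rw [pvOuter]
    have hng : ¬ ((seq.length : Int) < count) := by omega
    rw [dif_neg hng]
    have h0 : count.toNat - seq.length = 0 := by omega
    simp [h0]
  | succ n ih =>
    intro si seq L h
    rw [pvOuter]
    by_cases hlt : (seq.length : Int) < count
    · rw [dif_pos hlt]
      simp only []
      rw [pvInner_char count (pvProd L) si seq hlt]
      have hmap : (pvProd L).map (fun t => String.ofList t.reverse) = pvBlockStrs L := rfl
      have hlen : (pvProd L).length = 26 ^ L := pvProd_length L
      have htpos : 0 < 26 ^ L := pow_pos (by norm_num) L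
      have hblen : (pvBlockStrs L).length = 26 ^ L := pvBlockStrs_length L
      have hk : 0 < count.toNat - seq.length := by omega
      by_cases hts : 26 ^ L ≤ si.toNat
      · -- whole block skipped
        have hdrop : ((pvProd L).map (fun t => String.ofList t.reverse)).drop si.toNat = [] := by
          rw [hmap]
          exact List.drop_eq_nil_of_le (by omega)
        rw [hdrop]
        simp only [List.take_nil, List.append_nil, hlen]
        have hmin : min si.toNat (26 ^ L) = 26 ^ L := by omega
        rw [hmin]
        have hsn : (si - ((26 ^ L : Nat) : Int)).toNat = si.toNat - 26 ^ L := by omega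
        rw [ih _ seq (L + 1) (by omega)]
        congr 1
        apply List.map_congr_left
        intro i _
        rw [pvIdFrom_step L (si.toNat + i) (by omega), hsn]
        congr 1
        omega
      · -- block reaches position si.toNat
        have hmin : min si.toNat (pvProd L).length = si.toNat := by omega
        rw [hmin, hmap]
        have hsn : (si - (si.toNat : Int)).toNat = 0 := by omega
        by_cases hkt : count.toNat - seq.length ≤ 26 ^ L - si.toNat
        · -- count reached inside this block
          have hslice := pvBlock_slice L si.toNat (count.toNat - seq.length) (by omega)
          rw [hslice, ih _ _ (L + 1) (by rw [hsn]; simp; omega)]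
          have hk0 : count.toNat - (seq ++ (List.range (count.toNat - seq.length)).map
              (fun i => pvIdFrom L (si.toNat + i))).length = 0 := by
            simp; omega
          rw [hk0]
          simp
        · -- block exhausted, continue with next length
          have hrest : ((pvBlockStrs L).drop si.toNat).take (count.toNat - seq.length)
              = (List.range (26 ^ L - si.toNat)).map (fun i => pvIdFrom L (si.toNat + i)) := by
            rw [List.take_of_length_le
                  (by simp only [List.length_drop, hblen]; omega),
                show (pvBlockStrs L).drop si.toNat
                  = ((pvBlockStrs L).drop si.toNat).take (26 ^ L - si.toNat) from
                  (List.take_of_length_le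
                    (by simp only [List.length_drop, hblen]; omega)).symm]
            exact pvBlock_slice L si.toNat (26 ^ L - si.toNat) (by omega)
          rw [hrest, ih _ _ (L + 1) (by rw [hsn]; simp; omega)]
          have hk2 : count.toNat - (seq ++ (List.range (26 ^ L - si.toNat)).map
              (fun i => pvIdFrom L (si.toNat + i))).length
              = (count.toNat - seq.length) - (26 ^ L - si.toNat) := by
            simp; omega
          rw [hk2, hsn]
          have hsplit : count.toNat - seq.length
              = (26 ^ L - si.toNat) + ((count.toNat - seq.length) - (26 ^ L - si.toNat)) := by
            omega
          conv_rhs => rw [hsplit]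
          rw [List.range_add, List.map_append, List.map_map, List.append_assoc]
          congr 2
          apply List.map_congr_left
          intro j _
          simp only [Function.comp_apply]
          rw [show si.toNat + (26 ^ L - si.toNat + j) = 26 ^ L + j from by omega,
              pvIdFrom_step L (26 ^ L + j) (by omega)]
          congr 1
          omega
    · rw [dif_neg hlt]
      have h0 : count.toNat - seq.length = 0 := by omega
      simp [h0]

-- ===== VERDICT (by name: the statement is the Claim_ definition above) =====
theorem generate_ids_spec : Claim_equal_generate_ids := by
  intro si count _
  unfold Spec_generate_ids generate_ids generate_ids_alt
  rw [pvOuter_char count (si.toNat + count.toNat) si [] 1 (by simp)]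
  simp only [List.length_nil, Nat.sub_zero, List.nil_append]
  apply List.map_congr_left
  intro i _
  have h1 : pvIdFrom 1 (si.toNat + i) = pvIdAt (si.toNat + i) := by
    simp [pvIdFrom, pvIdAt, pow_one]
  have h2 : (max si 0).toNat = si.toNat := by omega
  rw [h1, h2]
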